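-- pv_equiv track=rewrite | github.com/queelius/ebk | book_memex/services/arkiv_import.py | _unique_id_from_book_uri
-- ===== SOURCE A (Python) =====
-- from typing import Any, Dict, Optional
--
-- def _unique_id_from_book_uri(uri: Optional[str]) -> Optional[str]:
--     """Extract the unique_id from a ``book-memex://book/<id>`` URI."""
--     if not uri:
--         return None
--     prefix = "book-memex://book/"
--     if not uri.startswith(prefix):
--         return None
--     tail = uri[len(prefix):]
--     for sep in ("?", "#"):
--         idx = tail.find(sep)
--         if idx >= 0:
--             tail = tail[:idx]
--     return tail or None
-- ===== SOURCE B (Python) =====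
-- def _unique_id_from_book_uri(uri):
--     """Extract the unique_id from a ``book-memex://book/<id>`` URI."""
--     prefix = "book-memex://book/"
--     if not uri or not uri.startswith(prefix):
--         return None
--     out = []
--     for ch in uri[len(prefix):]:
--         if ch in "?#":
--             break
--         out.append(ch)
--     return "".join(out) or None
-- ===== Notes on version B (the rewrite author's own statement) =====
-- stated objective: simpler
-- what changed: Replaces A's two sequential find-and-slice truncation passes over the tail with a single left-to-right character scan that stops at the first '?' or '#', collecting the id directly.
import Mathlib
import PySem

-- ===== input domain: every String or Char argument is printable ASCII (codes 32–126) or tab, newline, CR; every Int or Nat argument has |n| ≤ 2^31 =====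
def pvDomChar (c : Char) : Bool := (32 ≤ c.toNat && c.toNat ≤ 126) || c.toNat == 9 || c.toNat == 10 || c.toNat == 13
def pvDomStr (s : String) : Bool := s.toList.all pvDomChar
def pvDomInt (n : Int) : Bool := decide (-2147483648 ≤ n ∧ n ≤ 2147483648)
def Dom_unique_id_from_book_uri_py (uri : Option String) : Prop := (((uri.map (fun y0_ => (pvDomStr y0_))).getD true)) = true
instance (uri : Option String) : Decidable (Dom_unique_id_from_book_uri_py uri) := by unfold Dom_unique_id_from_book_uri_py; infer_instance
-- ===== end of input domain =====

-- B replaces A's two sequential find-and-slice truncation passes with a single left-to-right scan that stops at the first '?' or '#' (simpler).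

-- ===== PORT A =====
def unique_id_from_book_uri_py (uri : Option String) : Option String :=
  match uri with
  | none => none
  | some s =>
    if s == "" then none
    else
      let pre := "book-memex://book/"
      if !(PySem.Str.startswith s pre) then none
      else
        let tail := PySem.Str.slice s (some (PySem.Str.len pre : Int)) none
        let tail := ["?", "#"].foldl (fun t sep =>
          let idx := PySem.Str.find t sep
          if 0 ≤ idx then PySem.Str.slice t none (some idx) else t) tail
        if tail == "" then none else some tail

-- ===== PORT B =====
-- the for-loop with break: collect chars until the first '?' or '#'
def scanId : List Char → List Char
  | [] => []
  | c :: cs => if c == '?' || c == '#' then [] else c :: scanId cs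

def unique_id_from_book_uri_py_alt (uri : Option String) : Option String :=
  match uri with
  | none => none
  | some s =>
    let pre := "book-memex://book/"
    if s == "" || !(PySem.Str.startswith s pre) then none
    else
      let out := scanId (PySem.Str.slice s (some (PySem.Str.len pre : Int)) none).toList
      if out.isEmpty then none else some (String.ofList out)

-- ===== PRECONDITION & SPEC =====
def Spec_unique_id_from_book_uri_py (uri : Option String) (out : Option String) : Prop := out = unique_id_from_book_uri_py_alt uri
instance (uri : Option String) (out : Option String) : Decidable (Spec_unique_id_from_book_uri_py uri out) := by unfold Spec_unique_id_from_book_uri_py; infer_instance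

-- ===== CLAIM (what is proved, stated in full; the proofs are below) =====
def Claim_equal_unique_id_from_book_uri_py : Prop := ∀ (uri : Option String), Dom_unique_id_from_book_uri_py uri → Spec_unique_id_from_book_uri_py uri (unique_id_from_book_uri_py uri)

-- ===== LEMMAS AND PROOFS =====

lemma single_prefix_iff (c : Char) (l : List Char) : [c] <+: l ↔ l.head? = some c := by
  cases l with
  | nil => simp
  | cons x xs => simp [List.cons_prefix_cons, eq_comm]

lemma take_eq_takeWhile (c : Char) (t : List Char) (n : Nat)
    (h1 : t[n]? = some c) (h2 : ∀ i, i < n → t[i]? ≠ some c) :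
    t.take n = t.takeWhile (· != c) := by
  induction t generalizing n with
  | nil => simp at h1
  | cons x xs ih =>
    cases n with
    | zero =>
      simp at h1
      simp [h1]
    | succ m =>
      have hx : x ≠ c := by
        have := h2 0 (Nat.succ_pos m)
        simpa using this
      have h1' : xs[m]? = some c := by simpa using h1
      have h2' : ∀ i, i < m → xs[i]? ≠ some c := by
        intro i hi
        have := h2 (i+1) (by omega)
        simpa using this
      simp [hx, List.take_succ_cons, ih m h1' h2']

lemma step_eq_takeWhile (c : Char) (t : List Char) :
    (if 0 ≤ PySem.Chars.find t [c] then PySem.List.slice t none (some (PySem.Chars.find t [c])) else t)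
      = t.takeWhile (· != c) := by
  by_cases h : 0 ≤ PySem.Chars.find t [c]
  · rw [if_pos h, PySem.List.slice_to t h]
    obtain ⟨hpre, hmin⟩ := PySem.Chars.find_spec (s := t) (sub := [c]) h
    refine take_eq_takeWhile c t (PySem.Chars.find t [c]).toNat ?_ ?_
    · have := (single_prefix_iff c _).mp hpre
      rwa [List.head?_drop] at this
    · intro i hi hcontra
      exact hmin i hi ((single_prefix_iff c _).mpr (by rwa [List.head?_drop]))
  · rw [if_neg h]
    have hninf : ¬ [c] <:+: t := by
      rw [← PySem.Chars.find_nonneg_iff]; exact h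
    have hc : c ∉ t := by
      intro hm
      obtain ⟨l1, l2, rfl⟩ := List.append_of_mem hm
      exact hninf ⟨l1, l2, by simp⟩
    symm
    rw [List.takeWhile_eq_self_iff]
    intro x hx
    rw [bne_iff_ne]
    rintro rfl
    exact hc hx

lemma scanId_eq (t : List Char) :
    scanId t = (t.takeWhile (· != '?')).takeWhile (· != '#') := by
  induction t with
  | nil => rfl
  | cons x xs ih =>
    by_cases hq : x = '?'
    · simp [scanId, hq]
    · by_cases hh : x = '#'
      · simp [scanId, hh]
      · simp [scanId, hq, hh, ih]

lemma stepStr (u sep : String) (c : Char) (h : sep.toList = [c]) :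
    ((fun (t sep : String) =>
        let idx := PySem.Str.find t sep
        if 0 ≤ idx then PySem.Str.slice t none (some idx) else t) u sep).toList
      = u.toList.takeWhile (· != c) := by
  show (if 0 ≤ PySem.Str.find u sep then PySem.Str.slice u none (some (PySem.Str.find u sep)) else u).toList
      = u.toList.takeWhile (· != c)
  have hf : PySem.Str.find u sep = PySem.Chars.find u.toList [c] := by
    rw [PySem.Str.find_eq, h]
  have hmain := step_eq_takeWhile c u.toList
  by_cases hp : 0 ≤ PySem.Chars.find u.toList [c]
  · rw [if_pos (hf ▸ hp)] at *
    rw [← hmain, PySem.Str.toList_slice, hf, PySem.Chars.slice_eq_listSlice]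
  · rw [if_neg (by rw [hf]; exact hp)]
    rw [if_neg hp] at hmain
    exact hmain

lemma tail_eq (t : String) :
    (["?", "#"].foldl (fun t sep =>
        let idx := PySem.Str.find t sep
        if 0 ≤ idx then PySem.Str.slice t none (some idx) else t) t)
      = String.ofList (scanId t.toList) := by
  apply String.toList_injective
  rw [List.foldl_cons, List.foldl_cons, List.foldl_nil, scanId_eq]
  rw [stepStr _ "#" '#' rfl, stepStr t "?" '?' rfl]
  simp

lemma ofList_beq_empty (l : List Char) : (String.ofList l == "") = l.isEmpty := by
  cases l with
  | nil => rfl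
  | cons x xs =>
    simp only [List.isEmpty_cons]
    rw [beq_eq_false_iff_ne]
    intro h
    have := congrArg String.toList h
    simp at this

-- ===== VERDICT (by name: the statement is the Claim_ definition above) =====
theorem unique_id_from_book_uri_py_spec : Claim_equal_unique_id_from_book_uri_py := by
  intro uri _
  unfold Spec_unique_id_from_book_uri_py
  cases uri with
  | none => rfl
  | some s =>
    simp only [unique_id_from_book_uri_py, unique_id_from_book_uri_py_alt]
    by_cases h0 : (s == "") = true
    · rw [if_pos h0, if_pos (show (s == "" || !PySem.Str.startswith s "book-memex://book/") = true by rw [h0]; rfl)]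
    · have h0' : (s == "") = false := by simpa using h0
      rw [if_neg h0]
      by_cases h1 : PySem.Str.startswith s "book-memex://book/" = true
      · rw [if_neg (show ¬(!PySem.Str.startswith s "book-memex://book/") = true by rw [h1]; simp)]
        rw [if_neg (show ¬(s == "" || !PySem.Str.startswith s "book-memex://book/") = true by rw [h0', h1]; simp)]
        rw [tail_eq, ofList_beq_empty]
      · have h1' : PySem.Str.startswith s "book-memex://book/" = false := by simpa using h1
        rw [if_pos (show (!PySem.Str.startswith s "book-memex://book/") = true by rw [h1']; rfl)]
        rw [if_pos (show (s == "" || !PySem.Str.startswith s "book-memex://book/") = true by rw [h0', h1']; rfl)]
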